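-- pv_equiv track=rewrite | github.com/whirledsol/PythonScripts | PythonUtilities/Helpers/ListFxts.py | getNumPerRange_v2
-- ===== SOURCE A (Python) =====
-- from collections import OrderedDict
--
-- def getNumPerRange_v2(keys,tempList,upTo=False,returnList=True):
--     returning = OrderedDict()
--     for i in range(1,len(keys)):
--         temp = []
--         for each in tempList:
--             if upTo:
--                 if each <=keys[i]:
--                     temp.append(each)
--             else:
--                 if each >= keys[i-1] and each < keys[i]:
--                     temp.append(each)
--
--         returning[keys[i]] = len(temp)
--
--     if returnList:
--         return list(returning.values())
--     else:
--         return returning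
-- ===== SOURCE B (Python) =====
-- def _bisect_left(a, x):
--     lo, hi = 0, len(a)
--     while lo < hi:
--         mid = (lo + hi) // 2
--         if a[mid] < x:
--             lo = mid + 1
--         else:
--             hi = mid
--     return lo
--
-- def _bisect_right(a, x):
--     lo, hi = 0, len(a)
--     while lo < hi:
--         mid = (lo + hi) // 2
--         if a[mid] <= x:
--             lo = mid + 1
--         else:
--             hi = mid
--     return lo
--
-- def getNumPerRange_v2(keys, tempList, upTo=False, returnList=True):
--     s = sorted(tempList)
--     counts = {}
--     for i in range(1, len(keys)):
--         k = keys[i]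
--         if upTo:
--             c = _bisect_right(s, k)
--         else:
--             c = max(0, _bisect_left(s, k) - _bisect_left(s, keys[i - 1]))
--         counts[k] = c
--     return list(counts.values()) if returnList else counts
-- ===== Notes on version B (the rewrite author's own statement) =====
-- stated objective: faster
-- what changed: B sorts tempList once and computes each key's count with binary searches (hand-written bisect_left/bisect_right) instead of A's full rescan of tempList for every key.
-- outside the precondition, e.g. on getNumPerRange_v2([0, 5, 10], [1, 2, 6, 7, 12], False, False): A returns {5: 2, 10: 2}, B returns {5: 2, 10: 2}
import Mathlib
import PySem

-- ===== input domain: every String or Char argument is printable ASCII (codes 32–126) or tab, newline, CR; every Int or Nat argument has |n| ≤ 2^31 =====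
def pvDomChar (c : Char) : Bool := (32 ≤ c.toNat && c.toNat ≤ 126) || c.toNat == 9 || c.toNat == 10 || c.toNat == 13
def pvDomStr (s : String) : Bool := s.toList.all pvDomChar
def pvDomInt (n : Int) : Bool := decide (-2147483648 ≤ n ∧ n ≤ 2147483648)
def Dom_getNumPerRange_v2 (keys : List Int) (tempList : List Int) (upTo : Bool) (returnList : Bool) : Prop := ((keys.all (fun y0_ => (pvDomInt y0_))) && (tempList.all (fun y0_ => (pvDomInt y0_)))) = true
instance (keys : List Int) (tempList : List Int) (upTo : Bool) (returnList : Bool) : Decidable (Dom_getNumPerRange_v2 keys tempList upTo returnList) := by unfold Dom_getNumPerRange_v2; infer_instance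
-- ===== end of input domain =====

-- B sorts tempList once and computes each key's count with hand-written binary searches
-- (bisect_left/_right) instead of A's rescan of tempList per key; return value only.


-- ===== PORT A =====
def getNumPerRange_v2 (keys : List Int) (tempList : List Int) (upTo : Bool) (returnList : Bool) : List Int :=
  let returning : PySem.Dict Int Int :=
    (PySem.List.pyRange 1 (PySem.List.len keys) 1).foldl (fun returning i =>
      let temp : List Int := tempList.foldl (fun temp each =>
        if upTo then
          if each ≤ PySem.List.pyGetD keys i 0 then temp ++ [each] else temp
        else
          if PySem.List.pyGetD keys (i - 1) 0 ≤ each ∧ each < PySem.List.pyGetD keys i 0 then temp ++ [each] else temp) []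
      returning.insert (PySem.List.pyGetD keys i 0) (PySem.List.len temp)) PySem.Dict.empty
  if returnList then returning.values
  else []  -- returnList = False returns an OrderedDict in Python (not a list of ints): excluded by Pre_

-- ===== PORT B =====
-- Source B's hand-written _bisect_left/_bisect_right are the standard lo/hi halving loop,
-- which is exactly the loop PySem.List.bisectLeft / bisectRight implements (same midpoints).
def getNumPerRange_v2_alt (keys : List Int) (tempList : List Int) (upTo : Bool) (returnList : Bool) : List Int :=
  let s : List Int := PySem.List.sorted tempList (fun x => x) false
  let counts : PySem.Dict Int Int :=
    (PySem.List.pyRange 1 (PySem.List.len keys) 1).foldl (fun counts i =>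
      let k := PySem.List.pyGetD keys i 0
      let c : Int :=
        if upTo then ((PySem.List.bisectRight s k : Nat) : Int)
        else max 0 ((PySem.List.bisectLeft s k : Int) - (PySem.List.bisectLeft s (PySem.List.pyGetD keys (i - 1) 0) : Int))
      counts.insert k c) PySem.Dict.empty
  if returnList then counts.values
  else []  -- returnList = False returns a dict in Python (not a list of ints): excluded by Pre_

-- ===== PRECONDITION & SPEC =====
-- Pre_ excludes returnList = False, on which Python A returns an OrderedDict — not a value of the declared list-of-ints type.
def Pre_getNumPerRange_v2 (keys : List Int) (tempList : List Int) (upTo : Bool) (returnList : Bool) : Prop := returnList = true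
instance (keys : List Int) (tempList : List Int) (upTo : Bool) (returnList : Bool) : Decidable (Pre_getNumPerRange_v2 keys tempList upTo returnList) := by unfold Pre_getNumPerRange_v2; infer_instance
def pvWitness_getNumPerRange_v2 : List Int × List Int × Bool × Bool := ([0, 5, 10], [1, 2, 6, 7, 12], false, true)

def Spec_getNumPerRange_v2 (keys : List Int) (tempList : List Int) (upTo : Bool) (returnList : Bool) (out : List Int) : Prop := out = getNumPerRange_v2_alt keys tempList upTo returnList
instance (keys : List Int) (tempList : List Int) (upTo : Bool) (returnList : Bool) (out : List Int) : Decidable (Spec_getNumPerRange_v2 keys tempList upTo returnList out) := by unfold Spec_getNumPerRange_v2; infer_instance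

-- ===== CLAIM (what is proved, stated in full; the proofs are below) =====
def Claim_equal_getNumPerRange_v2 : Prop := ∀ (keys : List Int) (tempList : List Int) (upTo : Bool) (returnList : Bool), Dom_getNumPerRange_v2 keys tempList upTo returnList → Pre_getNumPerRange_v2 keys tempList upTo returnList → Spec_getNumPerRange_v2 keys tempList upTo returnList (getNumPerRange_v2 keys tempList upTo returnList)

-- ===== LEMMAS AND PROOFS =====

-- countP of a predicate that holds exactly on the index interval [L, K) of s.
theorem countP_index_interval (s : List Int) (p : Int → Bool) (L K : Nat)
    (hK : K ≤ s.length)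
    (h : ∀ (j : Nat) (hj : j < s.length), p s[j] = true ↔ (L ≤ j ∧ j < K)) :
    s.countP p = K - min K L := by
  have hsplit : s = s.take K ++ s.drop K := (List.take_append_drop K s).symm
  rw [hsplit, List.countP_append]
  have hdrop : (s.drop K).countP p = 0 := by
    rw [List.countP_eq_zero]
    intro a ha
    obtain ⟨j, hj, rfl⟩ := List.mem_iff_getElem.mp ha
    rw [List.getElem_drop]
    intro hp
    have := (h (K + j) (by simp at hj; omega)).mp (by simpa using hp)
    omega
  have htake : (s.take K).countP p = K - min K L := by
    have h2 : s.take K = (s.take K).take L ++ (s.take K).drop L := (List.take_append_drop L _).symm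
    rw [h2, List.countP_append]
    have hlen : (s.take K).length = K := by simp; omega
    have ha : ((s.take K).take L).countP p = 0 := by
      rw [List.countP_eq_zero]
      intro a ha
      obtain ⟨j, hj, rfl⟩ := List.mem_iff_getElem.mp ha
      have hjL : j < L := by simp at hj; omega
      have hjK : j < K := by simp at hj; omega
      rw [List.getElem_take, List.getElem_take]
      intro hp
      have := (h j (by omega)).mp hp
      omega
    have hb : ((s.take K).drop L).countP p = K - min K L := by
      have : ((s.take K).drop L).countP p = ((s.take K).drop L).length := by
        rw [List.countP_eq_length]
        intro a ha
        obtain ⟨j, hj, rfl⟩ := List.mem_iff_getElem.mp ha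
        have hjlen : L + j < K := by simp at hj; omega
        rw [List.getElem_drop, List.getElem_take]
        exact (h (L + j) (by omega)).mpr ⟨by omega, by omega⟩
      rw [this]
      simp; omega
    omega
  omega

-- upTo case: count of elements ≤ k equals bisect_right on the sorted list.
theorem count_upTo (tempList : List Int) (k : Int) :
    tempList.countP (fun e => decide (e ≤ k)) =
      PySem.List.bisectRight (PySem.List.sorted tempList (fun x => x) false) k := by
  set s := PySem.List.sorted tempList (fun x => x) false with hs
  have hperm : s.Perm tempList := PySem.List.sorted_perm tempList (fun x => x) false
  rw [← hperm.countP_eq]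
  have hpw : List.Pairwise (fun a b => a ≤ b) s := by
    simpa using PySem.List.sorted_pairwise tempList (fun x => x)
  obtain ⟨hlen, hlt, hge⟩ := PySem.List.bisectRight_spec s k hpw
  rw [countP_index_interval s _ 0 (PySem.List.bisectRight s k) hlen]
  · omega
  · intro j hj
    simp only [decide_eq_true_eq]
    constructor
    · intro hp
      refine ⟨Nat.zero_le _, ?_⟩
      by_contra hc
      exact absurd hp (not_le.mpr (hge j hj (by omega)))
    · intro ⟨_, hjK⟩
      exact hlt j hj hjK

-- range case: count of elements in [a, k) equals the clamped bisect_left difference.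
theorem count_range (tempList : List Int) (a k : Int) :
    ((tempList.countP (fun e => decide (a ≤ e ∧ e < k)) : Nat) : Int) =
      max 0 ((PySem.List.bisectLeft (PySem.List.sorted tempList (fun x => x) false) k : Int) -
             (PySem.List.bisectLeft (PySem.List.sorted tempList (fun x => x) false) a : Int)) := by
  set s := PySem.List.sorted tempList (fun x => x) false with hs
  have hperm : s.Perm tempList := PySem.List.sorted_perm tempList (fun x => x) false
  rw [← hperm.countP_eq]
  have hpw : List.Pairwise (fun a b => a ≤ b) s := by
    simpa using PySem.List.sorted_pairwise tempList (fun x => x)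
  obtain ⟨hlenK, hltK, hgeK⟩ := PySem.List.bisectLeft_spec s k hpw
  obtain ⟨hlenL, hltL, hgeL⟩ := PySem.List.bisectLeft_spec s a hpw
  set K := PySem.List.bisectLeft s k
  set L := PySem.List.bisectLeft s a
  rw [countP_index_interval s _ L K hlenK]
  · omega
  · intro j hj
    simp only [decide_eq_true_eq]
    constructor
    · intro ⟨h1, h2⟩
      constructor
      · by_contra hc
        exact absurd h1 (not_le.mpr (hltL j hj (by omega)))
      · by_contra hc
        exact absurd h2 (not_lt.mpr (hgeK j hj (by omega)))
    · intro ⟨h1, h2⟩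
      exact ⟨hgeL j hj h1, hltK j hj h2⟩

-- ===== VERDICT (by name: the statement is the Claim_ definition above) =====
theorem getNumPerRange_v2_spec : Claim_equal_getNumPerRange_v2 := by
  intro keys tempList upTo returnList _ hpre
  unfold Pre_getNumPerRange_v2 at hpre
  unfold Spec_getNumPerRange_v2 getNumPerRange_v2 getNumPerRange_v2_alt
  subst hpre
  simp only
  apply congrArg PySem.Dict.values
  apply PySem.List.foldl_congr_mem
  intro acc i _
  congr 1
  cases upTo
  · simp only [Bool.false_eq_true, if_false]
    rw [PySem.List.foldl_append_ite_eq_filter]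
    rw [PySem.List.len_eq, List.nil_append, ← List.countP_eq_length_filter]
    exact count_range tempList (PySem.List.pyGetD keys (i - 1) 0) (PySem.List.pyGetD keys i 0)
  · simp only [if_true]
    rw [PySem.List.foldl_append_ite_eq_filter]
    rw [PySem.List.len_eq, List.nil_append, ← List.countP_eq_length_filter]
    exact_mod_cast count_upTo tempList (PySem.List.pyGetD keys i 0)
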